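-- pv_equiv track=rewrite | github.com/programmerQI/python | CSCI2824/hw8/q13.py | wrangle_rectangles
-- ===== SOURCE A (Python) =====
-- def wrangle_rectangles(m, n):
--     sum = 0
--     for i in range(0, m):
--         pi = m - i
--         for j in range(0, n):
--             pj = n - j
--             sum = sum + pi * pj
--     return sum
-- ===== SOURCE B (Python) =====
-- def wrangle_rectangles(m, n):
--     tm = max(m, 0)
--     tn = max(n, 0)
--     return (tm * (tm + 1) // 2) * (tn * (tn + 1) // 2)
-- ===== Notes on version B (the rewrite author's own statement) =====
-- stated objective: faster
-- what changed: Replaced the nested O(m*n) accumulation loops with the closed form (m(m+1)/2)*(n(n+1)/2), clamping negative arguments to 0 as empty ranges.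
import Mathlib
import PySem

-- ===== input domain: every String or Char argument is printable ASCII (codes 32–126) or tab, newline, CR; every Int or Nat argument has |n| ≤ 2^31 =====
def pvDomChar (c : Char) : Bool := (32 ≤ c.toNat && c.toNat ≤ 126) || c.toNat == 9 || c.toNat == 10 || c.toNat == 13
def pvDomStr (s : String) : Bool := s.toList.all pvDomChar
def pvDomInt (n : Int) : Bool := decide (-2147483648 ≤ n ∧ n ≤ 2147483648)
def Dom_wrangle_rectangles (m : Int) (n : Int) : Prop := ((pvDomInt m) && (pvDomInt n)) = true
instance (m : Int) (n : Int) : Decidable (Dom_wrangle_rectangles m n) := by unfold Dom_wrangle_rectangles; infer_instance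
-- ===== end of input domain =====

-- B replaces A's nested O(m*n) loops by the closed form (m(m+1)/2)*(n(n+1)/2) (negative args clamped to 0, as empty ranges); objective: faster.

-- ===== PORT A =====
def wrangle_rectangles (m : Int) (n : Int) : Int :=
  (PySem.List.pyRange 0 m 1).foldl (fun sum i =>
    let pi := m - i
    (PySem.List.pyRange 0 n 1).foldl (fun sum j =>
      let pj := n - j
      sum + pi * pj) sum) 0

-- ===== PORT B =====
def wrangle_rectangles_alt (m : Int) (n : Int) : Int :=
  let tm := max m 0
  let tn := max n 0
  (PySem.Int.floordiv (tm * (tm + 1)) 2) * (PySem.Int.floordiv (tn * (tn + 1)) 2)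

-- ===== PRECONDITION & SPEC =====
def Spec_wrangle_rectangles (m : Int) (n : Int) (out : Int) : Prop := out = wrangle_rectangles_alt m n
instance (m : Int) (n : Int) (out : Int) : Decidable (Spec_wrangle_rectangles m n out) := by unfold Spec_wrangle_rectangles; infer_instance

-- ===== CLAIM (what is proved, stated in full; the proofs are below) =====
def Claim_equal_wrangle_rectangles : Prop := ∀ (m : Int) (n : Int), Dom_wrangle_rectangles m n → Spec_wrangle_rectangles m n (wrangle_rectangles m n)

-- ===== LEMMAS AND PROOFS =====

-- twice the countdown-sum Σ_{k<N} (N - k) equals N(N+1)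
theorem pv_two_tri (N : Nat) :
    2 * ((List.range N).map (fun (k : Nat) => ((N : Int) - (k : Int)))).sum = (N : Int) * ((N : Int) + 1) := by
  induction N with
  | zero => simp
  | succ N ih =>
    have step : ((List.range (N + 1)).map (fun (k : Nat) => (((N + 1 : Nat) : Int) - (k : Int)))).sum
        = ((List.range N).map (fun (k : Nat) => ((N : Int) - (k : Int)))).sum + ((N : Int) + 1) := by
      rw [List.range_succ, List.map_append, List.sum_append]
      have heq : ((List.range N).map (fun (k : Nat) => (((N + 1 : Nat) : Int) - (k : Int)))).sum
          = ((List.range N).map (fun (k : Nat) => ((N : Int) - (k : Int)) + 1)).sum := by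
        congr 1; apply List.map_congr_left; intro k _; push_cast; ring
      rw [heq, PySem.List.sum_map_add_int]
      simp; ring
    rw [step]; push_cast; push_cast at ih; linarith

-- the countdown-sum over pyRange 0 k, for arbitrary Int k
theorem pv_tri_pyRange (k : Int) :
    ((PySem.List.pyRange 0 k 1).map (fun j => k - j)).sum
      = PySem.Int.floordiv (max k 0 * (max k 0 + 1)) 2 := by
  rw [PySem.List.pyRange_one]
  rw [PySem.Int.floordiv_eq_ediv_of_pos (by omega)]
  rw [List.map_map]
  rcases le_or_gt k 0 with hk | hk
  · have h0 : k.toNat = 0 := by omega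
    have hm : max k 0 = 0 := by omega
    simp [h0, hm]
  · have hN : ((k - 0).toNat : Int) = k := by omega
    have hm : max k 0 = k := by omega
    have h2 := pv_two_tri (k - 0).toNat
    rw [hN] at h2
    have heq : ((List.range (k - 0).toNat).map ((fun j => k - j) ∘ (fun (x : Nat) => (0 : Int) + (x : Int)))).sum
        = ((List.range (k - 0).toNat).map (fun (j : Nat) => k - (j : Int))).sum := by
      congr 1; apply List.map_congr_left; intro x _; simp
    rw [heq, hm]
    omega

-- ===== VERDICT (by name: the statement is the Claim_ definition above) =====
theorem wrangle_rectangles_spec : Claim_equal_wrangle_rectangles := by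
  intro m n _
  unfold Spec_wrangle_rectangles wrangle_rectangles wrangle_rectangles_alt
  simp only []
  have inner : ∀ (s pi : Int),
      (PySem.List.pyRange 0 n 1).foldl (fun sum j => sum + pi * (n - j)) s
        = s + pi * ((PySem.List.pyRange 0 n 1).map (fun j => n - j)).sum := by
    intro s pi
    rw [PySem.List.foldl_add (g := fun j => pi * (n - j)), List.sum_map_mul_left]
  calc
    (PySem.List.pyRange 0 m 1).foldl (fun sum i =>
        (PySem.List.pyRange 0 n 1).foldl (fun sum j => sum + (m - i) * (n - j)) sum) 0
      = (PySem.List.pyRange 0 m 1).foldl (fun sum i =>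
          sum + (m - i) * ((PySem.List.pyRange 0 n 1).map (fun j => n - j)).sum) 0 := by
        apply PySem.List.foldl_congr_mem; intro acc i _; exact inner acc (m - i)
    _ = 0 + ((PySem.List.pyRange 0 m 1).map
          (fun i => (m - i) * ((PySem.List.pyRange 0 n 1).map (fun j => n - j)).sum)).sum :=
        PySem.List.foldl_add _ _ _
    _ = ((PySem.List.pyRange 0 m 1).map (fun i => m - i)).sum
          * ((PySem.List.pyRange 0 n 1).map (fun j => n - j)).sum := by
        rw [zero_add, List.sum_map_mul_right]
    _ = (PySem.Int.floordiv (max m 0 * (max m 0 + 1)) 2)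
          * (PySem.Int.floordiv (max n 0 * (max n 0 + 1)) 2) := by
        rw [pv_tri_pyRange, pv_tri_pyRange]
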